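-- pv_equiv track=rewrite | github.com/dschrengost/projections-v2 | scoring.py | _iter_ranges
-- ===== SOURCE A (Python) =====
-- from typing import Dict, Iterable, List, Mapping, Sequence, Union
--
-- def _iter_ranges(total: int, step: int) -> List[tuple[int, int]]:
--     """Return deterministic (start, stop) windows covering ``total`` items."""
--
--     if step <= 0:
--         raise ValueError("step must be positive")
--     if total <= 0:
--         return []
--     ranges: List[tuple[int, int]] = []
--     for start in range(0, total, step):
--         stop = min(start + step, total)
--         ranges.append((start, stop))
--     return ranges
-- ===== SOURCE B (Python) =====
-- from typing import List
--
--
-- def _iter_ranges(total: int, step: int) -> List[tuple[int, int]]: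
--     """Return deterministic (start, stop) windows covering ``total`` items."""
--
--     if step <= 0:
--         raise ValueError("step must be positive")
--     ranges: List[tuple[int, int]] = []
--     stop = total
--     while stop > 0:
--         start = ((stop - 1) // step) * step
--         ranges.append((start, stop))
--         stop = start
--     ranges.reverse()
--     return ranges
-- ===== Notes on version B (the rewrite author's own statement) =====
-- stated objective: alternative
-- what changed: B builds the windows back-to-front: starting from stop=total it floor-aligns each window start with ((stop-1)//step)*step, walks down to 0 and reverses the accumulator, instead of A's forward range loop that clips each stop with min(start+step,total).
import Mathlib
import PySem

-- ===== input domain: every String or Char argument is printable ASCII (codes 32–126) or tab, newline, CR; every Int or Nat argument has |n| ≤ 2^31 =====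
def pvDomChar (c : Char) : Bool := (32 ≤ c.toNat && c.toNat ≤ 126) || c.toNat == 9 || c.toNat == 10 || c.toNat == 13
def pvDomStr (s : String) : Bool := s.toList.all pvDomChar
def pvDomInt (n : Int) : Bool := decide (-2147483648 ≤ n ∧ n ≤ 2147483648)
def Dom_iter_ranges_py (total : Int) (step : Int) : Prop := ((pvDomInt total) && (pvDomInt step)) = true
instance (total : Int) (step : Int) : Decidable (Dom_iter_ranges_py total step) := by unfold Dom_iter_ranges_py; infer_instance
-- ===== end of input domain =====

-- B builds the windows back-to-front (floor-aligning each start with ((stop-1)//step)*step,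
-- then reversing) instead of A's forward range loop clipping each stop with min (alternative).

-- ===== PORT A =====
def iter_ranges_py (total : Int) (step : Int) : List (Int × Int) :=
  if step ≤ 0 then []          -- Python raises ValueError here; excluded by Pre_
  else if total ≤ 0 then []
  else (PySem.List.pyRange 0 total step).foldl
        (fun ranges start => ranges ++ [(start, min (start + step) total)]) []

-- ===== PORT B =====
-- the 'while stop > 0' loop of Source B; fuel only makes the recursion total (total.toNat iterations suffice)
def goB (step : Int) : Nat → Int → List (Int × Int) → List (Int × Int)
  | 0, _, out => out
  | f + 1, stop, out =>
      if 0 < stop then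
        let start := PySem.Int.floordiv (stop - 1) step * step
        goB step f start (out ++ [(start, stop)])
      else out

def iter_ranges_py_alt (total : Int) (step : Int) : List (Int × Int) :=
  if step ≤ 0 then []          -- Python raises ValueError here; excluded by Pre_
  else (goB step total.toNat total []).reverse

-- ===== PRECONDITION & SPEC =====
-- Pre_ excludes exactly step ≤ 0, where Python A raises ValueError("step must be positive").
def Pre_iter_ranges_py (total : Int) (step : Int) : Prop := 0 < step
instance (total : Int) (step : Int) : Decidable (Pre_iter_ranges_py total step) := by unfold Pre_iter_ranges_py; infer_instance
def pvWitness_iter_ranges_py : Int × Int := (10, 3)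

def Spec_iter_ranges_py (total : Int) (step : Int) (out : List (Int × Int)) : Prop := out = iter_ranges_py_alt total step
instance (total : Int) (step : Int) (out : List (Int × Int)) : Decidable (Spec_iter_ranges_py total step out) := by unfold Spec_iter_ranges_py; infer_instance

-- ===== CLAIM (what is proved, stated in full; the proofs are below) =====
def Claim_equal_iter_ranges_py : Prop := ∀ (total : Int) (step : Int), Dom_iter_ranges_py total step → Pre_iter_ranges_py total step → Spec_iter_ranges_py total step (iter_ranges_py total step)

-- ===== LEMMAS AND PROOFS =====

-- common closed form both ports are reduced to: window k is (step*k, min (step*k+step) stop)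
def pvWin (step stop : Int) : List (Int × Int) :=
  (List.range ((stop + step - 1) / step).toNat).map
    (fun (k : Nat) => (step * (k : Int), min (step * (k : Int) + step) stop))

lemma pvWin_nonpos (step stop : Int) (hs : 0 < step) (h : stop ≤ 0) : pvWin step stop = [] := by
  unfold pvWin
  have h1 : (stop + step - 1) / step < 1 := by
    rw [Int.ediv_lt_iff_lt_mul hs]; omega
  have h2 : ((stop + step - 1) / step).toNat = 0 := by omega
  rw [h2]; simp

lemma goB_eq (step : Int) (hs : 0 < step) :
    ∀ (fuel : Nat) (stop : Int) (out : List (Int × Int)), stop.toNat ≤ fuel →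
      goB step fuel stop out = out ++ (pvWin step stop).reverse := by
  intro fuel
  induction fuel with
  | zero =>
      intro stop out h
      rw [pvWin_nonpos step stop hs (by omega)]
      simp [goB]
  | succ f ih =>
      intro stop out h
      by_cases hpos : 0 < stop
      · have hM : PySem.Int.floordiv (stop - 1) step = (stop - 1) / step :=
          PySem.Int.floordiv_eq_ediv_of_pos hs
        set m : Int := (stop - 1) / step with hm
        have hdm := Int.emod_add_mul_ediv (stop - 1) step
        have hr0 : 0 ≤ (stop - 1) % step := Int.emod_nonneg _ (by omega)
        have hr1 : (stop - 1) % step < step := Int.emod_lt_of_pos _ hs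
        have hlb : step * m ≤ stop - 1 := by rw [hm]; linarith
        have hub : stop - 1 < step * m + step := by rw [hm]; linarith
        have hm0 : 0 ≤ m := Int.ediv_nonneg (by omega) (by omega)
        have hstart0 : 0 ≤ m * step := mul_nonneg hm0 (le_of_lt hs)
        have hlb' : m * step ≤ stop - 1 := by rw [mul_comm]; exact hlb
        have hsplit : pvWin step stop = pvWin step (m * step) ++ [(m * step, stop)] := by
          unfold pvWin
          have hq1 : (stop + step - 1) / step = m + 1 := by
            rw [← PySem.Int.floordiv_eq_ediv_of_pos hs,
                PySem.Int.floordiv_eq_iff_of_pos hs]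
            constructor <;> nlinarith
          have hq2 : (m * step + step - 1) / step = m := by
            rw [← PySem.Int.floordiv_eq_ediv_of_pos hs,
                PySem.Int.floordiv_eq_iff_of_pos hs]
            constructor <;> nlinarith
          rw [hq1, hq2]
          have hms : (m + 1).toNat = m.toNat + 1 := by omega
          rw [hms, List.range_succ, List.map_append]
          congr 1
          · apply List.map_congr_left; intro k hk
            have hkm : (k : Int) < m := by
              have := List.mem_range.mp hk; omega
            have hle : step * (k : Int) + step ≤ m * step := by nlinarith
            have hle2 : step * (k : Int) + step ≤ stop := by nlinarith
            rw [min_eq_left hle2, min_eq_left hle]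
          · have hcast : ((m.toNat : Int)) = m := Int.toNat_of_nonneg hm0
            simp only [List.map_cons, List.map_nil, hcast]
            have hmin : min (step * m + step) stop = stop := min_eq_right (by linarith)
            rw [hmin, mul_comm]
        have hf : (m * step).toNat ≤ f := by omega
        simp only [goB, if_pos hpos, hM]
        rw [ih (m * step) (out ++ [(m * step, stop)]) hf, hsplit]
        simp
      · rw [pvWin_nonpos step stop hs (by omega)]
        simp [goB, hpos]

lemma A_eq (total step : Int) (hs : 0 < step) :
    iter_ranges_py total step = pvWin step total := by
  unfold iter_ranges_py
  rw [if_neg (not_le.mpr hs)]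
  by_cases ht : total ≤ 0
  · rw [if_pos ht, pvWin_nonpos step total hs ht]
  · rw [if_neg ht, PySem.List.pyRange_of_pos 0 total hs,
        if_pos (by omega : (0:Int) < total)]
    rw [List.foldl_map, PySem.List.foldl_append_singleton_eq_map]
    unfold pvWin
    simp

-- ===== VERDICT (by name: the statement is the Claim_ definition above) =====
theorem iter_ranges_py_spec : Claim_equal_iter_ranges_py := by
  intro total step _ hpre
  unfold Spec_iter_ranges_py
  have hs : ¬ step ≤ 0 := not_le.mpr hpre
  rw [A_eq total step hpre]
  unfold iter_ranges_py_alt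
  rw [if_neg hs, goB_eq step hpre total.toNat total [] (le_refl _)]
  simp
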